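-- pv_equiv track=rewrite | github.com/bobob0311/AIWorkoutLog | scripts/execute.py | _derive_phase_status
-- ===== SOURCE A (Python) =====
-- def _derive_phase_status(steps: list[dict]) -> str:
--     statuses = [step.get("status") for step in steps]
--     if statuses and all(status == "completed" for status in statuses):
--         return "completed"
--     if any(status == "error" for status in statuses):
--         return "error"
--     if any(status == "blocked" for status in statuses):
--         return "blocked"
--     if any(status == "in_progress" for status in statuses):
--         return "in_progress"
--     return "pending"
-- ===== SOURCE B (Python) =====
-- def _derive_phase_status(steps: list) -> str:
--     total = 0
--     completed = 0
--     has_error = False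
--     has_blocked = False
--     has_in_progress = False
--     for step in steps:
--         s = step.get("status")
--         total += 1
--         if s == "completed":
--             completed += 1
--         elif s == "error":
--             has_error = True
--         elif s == "blocked":
--             has_blocked = True
--         elif s == "in_progress":
--             has_in_progress = True
--     if total > 0 and completed == total:
--         return "completed"
--     if has_error:
--         return "error"
--     if has_blocked:
--         return "blocked"
--     if has_in_progress:
--         return "in_progress"
--     return "pending"
-- ===== Notes on version B (the rewrite author's own statement) =====
-- stated objective: alternative
-- what changed: Replaces A's list comprehension plus four separate all/any scans with a single pass that maintains total/completed counters and three boolean flags, deciding the status once after the loop.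
import Mathlib
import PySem

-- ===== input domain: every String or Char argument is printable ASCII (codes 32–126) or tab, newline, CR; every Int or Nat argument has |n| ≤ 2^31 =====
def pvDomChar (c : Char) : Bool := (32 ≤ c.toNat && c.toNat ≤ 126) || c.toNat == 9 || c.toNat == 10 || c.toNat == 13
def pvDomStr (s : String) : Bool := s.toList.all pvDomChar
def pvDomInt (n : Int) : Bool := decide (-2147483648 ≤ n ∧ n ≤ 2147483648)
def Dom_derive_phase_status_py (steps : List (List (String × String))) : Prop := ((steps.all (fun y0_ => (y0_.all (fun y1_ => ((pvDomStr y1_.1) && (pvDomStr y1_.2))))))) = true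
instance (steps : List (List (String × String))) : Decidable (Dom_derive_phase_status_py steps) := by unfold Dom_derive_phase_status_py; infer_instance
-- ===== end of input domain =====

-- B single-pass over steps: counters + flags, one decision after the loop; return value equivalent to A.

-- ===== PORT A =====
def derive_phase_status_py (steps : List (List (String × String))) : String :=
  let statuses := steps.map (fun step => (PySem.Dict.mk step).get? "status")
  if statuses ≠ [] ∧ statuses.all (fun s => s == some "completed") then "completed"
  else if statuses.any (fun s => s == some "error") then "error"
  else if statuses.any (fun s => s == some "blocked") then "blocked"
  else if statuses.any (fun s => s == some "in_progress") then "in_progress"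
  else "pending"

-- ===== PORT B =====
def altStep (acc : Nat × Nat × Bool × Bool × Bool) (step : List (String × String)) :
    Nat × Nat × Bool × Bool × Bool :=
  match acc with
  | (total, completed, he, hb, hp) =>
    let s := (PySem.Dict.mk step).get? "status"
    let total := total + 1
    if s = some "completed" then (total, completed + 1, he, hb, hp)
    else if s = some "error" then (total, completed, true, hb, hp)
    else if s = some "blocked" then (total, completed, he, true, hp)
    else if s = some "in_progress" then (total, completed, he, hb, true)
    else (total, completed, he, hb, hp)

def derive_phase_status_py_alt (steps : List (List (String × String))) : String :=
  match steps.foldl altStep (0, 0, false, false, false) with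
  | (total, completed, he, hb, hp) =>
    if 0 < total ∧ completed = total then "completed"
    else if he then "error"
    else if hb then "blocked"
    else if hp then "in_progress"
    else "pending"

-- ===== PRECONDITION & SPEC =====
def Spec_derive_phase_status_py (steps : List (List (String × String))) (out : String) : Prop := out = derive_phase_status_py_alt steps
instance (steps : List (List (String × String))) (out : String) : Decidable (Spec_derive_phase_status_py steps out) := by unfold Spec_derive_phase_status_py; infer_instance

-- ===== CLAIM (what is proved, stated in full; the proofs are below) =====
def Claim_equal_derive_phase_status_py : Prop := ∀ (steps : List (List (String × String))), Dom_derive_phase_status_py steps → Spec_derive_phase_status_py steps (derive_phase_status_py steps)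

-- ===== LEMMAS AND PROOFS =====

lemma alt_fold (l : List (List (String × String))) (t c : Nat) (he hb hp : Bool) :
    l.foldl altStep (t, c, he, hb, hp) =
      (t + l.length,
       c + l.countP (fun step => (PySem.Dict.mk step).get? "status" == some "completed"),
       he || l.any (fun step => (PySem.Dict.mk step).get? "status" == some "error"),
       hb || l.any (fun step => (PySem.Dict.mk step).get? "status" == some "blocked"),
       hp || l.any (fun step => (PySem.Dict.mk step).get? "status" == some "in_progress")) := by
  induction l generalizing t c he hb hp with
  | nil => simp
  | cons x xs ih =>
    simp only [List.foldl_cons, List.countP_cons, List.any_cons, List.length_cons, altStep]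
    by_cases h1 : (PySem.Dict.mk x).get? "status" = some "completed"
    · simp [h1, ih]; omega
    · by_cases h2 : (PySem.Dict.mk x).get? "status" = some "error"
      · simp [h2, ih]; omega
      · by_cases h3 : (PySem.Dict.mk x).get? "status" = some "blocked"
        · simp [h3, ih]; omega
        · by_cases h4 : (PySem.Dict.mk x).get? "status" = some "in_progress"
          · simp [h4, ih]; omega
          · simp [h1, h2, h3, h4, ih, beq_eq_false_iff_ne.mpr h2,
                  beq_eq_false_iff_ne.mpr h3, beq_eq_false_iff_ne.mpr h4]
            omega

-- ===== VERDICT (by name: the statement is the Claim_ definition above) =====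
theorem derive_phase_status_py_spec : Claim_equal_derive_phase_status_py := by
  intro steps _
  unfold Spec_derive_phase_status_py derive_phase_status_py derive_phase_status_py_alt
  rw [alt_fold]
  simp only [Nat.zero_add, Bool.false_or]
  have hcomp : (0 < steps.length ∧
      steps.countP (fun step => (PySem.Dict.mk step).get? "status" == some "completed") = steps.length)
      ↔ (steps.map (fun step => (PySem.Dict.mk step).get? "status") ≠ [] ∧
         (steps.map (fun step => (PySem.Dict.mk step).get? "status")).all (fun s => s == some "completed")) := by
    constructor
    · rintro ⟨hlen, hcnt⟩
      refine ⟨by simpa using List.length_pos_iff.mp (by simpa using hlen), ?_⟩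
      rw [List.all_map]
      rw [List.countP_eq_length] at hcnt
      simpa [List.all_eq_true] using hcnt
    · rintro ⟨hne, hall⟩
      rw [List.all_map] at hall
      refine ⟨by simpa using List.length_pos_iff.mpr (by simpa using hne), ?_⟩
      rw [List.countP_eq_length]
      simpa [List.all_eq_true] using hall
  by_cases h : 0 < steps.length ∧
      steps.countP (fun step => (PySem.Dict.mk step).get? "status" == some "completed") = steps.length
  · rw [if_pos h, if_pos (hcomp.mp h)]
  · rw [if_neg h, if_neg (fun hc => h (hcomp.mpr hc))]
    simp [List.any_map, Function.comp]
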